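-- pv_equiv track=rewrite | github.com/pypi-data/pypi-mirror-365 | packages/enveil/enveil-1.0.0-py3-none-any.whl/enveil/collectors/hardware_collector.py | _format_cpu_windows
-- ===== SOURCE A (Python) =====
-- def _format_cpu_windows(raw_cpu: str) -> str:
--     """wmicからのCPU情報を整形"""
--     try:
--         for line in raw_cpu.splitlines():
--             line = line.strip()
--             if line.startswith("Name="):
--                 return line.split("=", 1)[1].strip()
--         return "N/A"
--     except Exception:
--         return "N/A"
-- ===== SOURCE B (Python) =====
-- def _format_cpu_windows(raw_cpu: str) -> str:
--     """wmicからのCPU情報を整形 — parse all key=value lines into a dict, then look up 'Name'."""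
--     info = {}
--     for line in raw_cpu.splitlines():
--         line = line.strip()
--         if "=" in line:
--             key, value = line.split("=", 1)
--             if key not in info:
--                 info[key] = value.strip()
--     return info.get("Name", "N/A")
-- ===== Notes on version B (the rewrite author's own statement) =====
-- stated objective: alternative
-- what changed: Instead of scanning for the first line whose stripped form starts with 'Name=' and returning early, B parses every key=value line into a first-occurrence dict and returns the 'Name' entry (default 'N/A') afterwards.
import Mathlib
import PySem

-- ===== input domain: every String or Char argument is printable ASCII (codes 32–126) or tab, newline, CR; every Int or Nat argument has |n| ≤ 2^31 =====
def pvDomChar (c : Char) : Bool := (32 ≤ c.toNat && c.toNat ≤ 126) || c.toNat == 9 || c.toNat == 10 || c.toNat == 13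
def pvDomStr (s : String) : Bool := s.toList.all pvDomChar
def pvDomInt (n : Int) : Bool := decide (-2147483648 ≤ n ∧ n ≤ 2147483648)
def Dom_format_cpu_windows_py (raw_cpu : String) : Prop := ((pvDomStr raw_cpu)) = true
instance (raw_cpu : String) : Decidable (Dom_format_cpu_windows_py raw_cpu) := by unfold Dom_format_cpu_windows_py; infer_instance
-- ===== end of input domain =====

-- B replaces A's early-return scan for the first stripped 'Name='-line by building a
-- first-occurrence key=value dict over all lines and looking up 'Name' afterwards (objective: alternative).

-- ===== PORT A =====
-- the early-return loop over raw_cpu.splitlines(); the `none` arm of the index is A's `except: return "N/A"`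
def pvALoop : List String → String
  | [] => "N/A"
  | line :: rest =>
    let l := PySem.Str.strip line
    if PySem.Str.startswith l "Name=" then
      match PySem.List.pyGet? ((PySem.Str.splitMax? l "=" 1).getD []) 1 with
      | some p => PySem.Str.strip p
      | none => "N/A"
    else pvALoop rest

def format_cpu_windows_py (raw_cpu : String) : String :=
  pvALoop (PySem.Str.splitlines raw_cpu)

-- ===== PORT B =====
-- one loop iteration: strip, and if '=' occurs, split once and record the first occurrence of the key
def pvBStep (d : PySem.Dict String String) (line : String) : PySem.Dict String String :=
  let l := PySem.Str.strip line
  if PySem.Str.isIn "=" l then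
    let parts := (PySem.Str.splitMax? l "=" 1).getD []
    let key := parts.getD 0 ""
    let value := parts.getD 1 ""
    if d.contains key then d else d.insert key (PySem.Str.strip value)
  else d

def format_cpu_windows_py_alt (raw_cpu : String) : String :=
  PySem.Dict.getD ((PySem.Str.splitlines raw_cpu).foldl pvBStep PySem.Dict.empty) "Name" "N/A"

-- ===== PRECONDITION & SPEC =====
def Spec_format_cpu_windows_py (raw_cpu : String) (out : String) : Prop := out = format_cpu_windows_py_alt raw_cpu
instance (raw_cpu : String) (out : String) : Decidable (Spec_format_cpu_windows_py raw_cpu out) := by unfold Spec_format_cpu_windows_py; infer_instance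

-- ===== CLAIM (what is proved, stated in full; the proofs are below) =====
def Claim_equal_format_cpu_windows_py : Prop := ∀ (raw_cpu : String), Dom_format_cpu_windows_py raw_cpu → Spec_format_cpu_windows_py raw_cpu (format_cpu_windows_py raw_cpu)

-- ===== LEMMAS AND PROOFS =====

-- splitting a line at its first '=' (the value both ports' `split("=", 1)` computes)
def pvPart : List Char → Option (List Char × List Char)
  | [] => none
  | c :: r => if c = '=' then some ([], r) else (pvPart r).map (fun p => (c :: p.1, p.2))

lemma pvPart_eq_none_iff (l : List Char) : pvPart l = none ↔ '=' ∉ l := by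
  induction l with
  | nil => simp [pvPart]
  | cons c r ih =>
    by_cases hc : c = '='
    · subst hc; simp [pvPart]
    · simp [pvPart, hc, Option.map_eq_none_iff, ih, Ne.symm hc]

lemma pvPart_some (l a b : List Char) (h : pvPart l = some (a, b)) :
    l = a ++ '=' :: b ∧ '=' ∉ a := by
  induction l generalizing a b with
  | nil => simp [pvPart] at h
  | cons c r ih =>
    by_cases hc : c = '='
    · subst hc; simp [pvPart] at h; obtain ⟨rfl, rfl⟩ := h; simp
    · simp only [pvPart, if_neg hc, Option.map_eq_some_iff] at h
      obtain ⟨⟨a', b'⟩, hp, he⟩ := h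
      obtain ⟨h1, h2⟩ := Prod.mk.injEq .. ▸ he
      obtain ⟨hl, hm⟩ := ih a' b' hp
      subst h2
      constructor
      · simp [← h1, hl]
      · simp only [← h1, List.mem_cons, not_or]
        exact ⟨Ne.symm hc, hm⟩

lemma pvPart_append (a b : List Char) (h : '=' ∉ a) : pvPart (a ++ '=' :: b) = some (a, b) := by
  induction a with
  | nil => simp [pvPart]
  | cons c r ih =>
    simp only [List.mem_cons, not_or] at h
    have hcc : ¬ c = '=' := fun hcc => h.1 hcc.symm
    simp [pvPart, hcc, ih h.2]

-- m = 0: the loop of split("=", 1) just flushes the remainder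
lemma pvGo_zero (fuel : Nat) (l cur : List Char) (acc : List (List Char)) (hf : 0 < fuel) :
    PySem.Chars.splitOnMax.go ['='] fuel 0 l cur acc = ((cur.reverse ++ l) :: acc).reverse := by
  cases fuel with
  | zero => omega
  | succ f => cases l with
    | nil => simp [PySem.Chars.splitOnMax.go]
    | cons c r => simp [PySem.Chars.splitOnMax.go]

-- m = 1: split("=", 1) splits at the first '=' (if any), described by pvPart
lemma pvGo_one (fuel : Nat) : ∀ (l cur : List Char) (acc : List (List Char)), l.length < fuel →
    PySem.Chars.splitOnMax.go ['='] fuel 1 l cur acc =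
      acc.reverse ++ (match pvPart l with
        | none => [cur.reverse ++ l]
        | some p => [cur.reverse ++ p.1, p.2]) := by
  induction fuel with
  | zero => intro l cur acc h; omega
  | succ f ih =>
    intro l cur acc h
    cases l with
    | nil => simp [PySem.Chars.splitOnMax.go, pvPart]
    | cons c r =>
      by_cases hc : c = '='
      · subst hc
        have : List.isPrefixOf ['='] ('=' :: r) = true := by simp [List.isPrefixOf]
        simp only [PySem.Chars.splitOnMax.go, this, if_true]
        rw [pvGo_zero _ _ _ _ (by simp only [List.length_cons] at h; omega)]
        simp [pvPart]
      · simp only [PySem.Chars.splitOnMax.go]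
        rw [if_neg (by simp [eq_comm])]
        rw [ih r (c :: cur) acc (by simp only [List.length_cons] at h; omega)]
        have hce : ¬'=' = c := fun hh => hc hh.symm
        cases hpp : pvPart r with
        | none => simp [pvPart, hc, hce, hpp]
        | some p => simp [pvPart, hc, hce, hpp]

lemma pvSplit_spec (s : List Char) :
    PySem.Chars.splitOnMax s ['='] 1 =
      match pvPart s with
      | none => [s]
      | some p => [p.1, p.2] := by
  rw [PySem.Chars.splitOnMax]
  rw [if_neg (by omega)]
  have h1 : Int.toNat 1 = 1 := rfl
  rw [h1, pvGo_one (s.length + 1) s [] [] (by omega)]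
  cases hpp : pvPart s with
  | none => simp
  | some p => simp

-- the string-level split both ports use, phrased through pvPart
lemma pvSplitStr (l : String) :
    (PySem.Str.splitMax? l "=" 1).getD [] =
      match pvPart l.toList with
      | none => [l]
      | some p => [String.ofList p.1, String.ofList p.2] := by
  rw [PySem.Str.splitMax?]
  have : ("=" : String).toList = ['='] := rfl
  rw [this]
  rw [PySem.Chars.splitMax?]
  rw [if_neg (by simp)]
  rw [pvSplit_spec]
  cases hpp : pvPart l.toList with
  | none => simp
  | some p => simp

-- '=' in l  ↔  pvPart finds a split
lemma pvIsIn_iff (l : String) : PySem.Str.isIn "=" l = true ↔ pvPart l.toList ≠ none := by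
  rw [PySem.Str.isIn]
  have : ("=" : String).toList = ['='] := rfl
  have hmem : ['='] <:+: l.toList ↔ '=' ∈ l.toList := by
    constructor
    · intro h; exact h.mem (by simp)
    · intro h
      obtain ⟨s, t, hst⟩ := List.append_of_mem h
      exact ⟨s, t, by rw [hst]; simp⟩
  rw [this, PySem.Chars.isIn_iff_infix, hmem]
  simp only [Ne, pvPart_eq_none_iff, not_not]

-- line starts with "Name="  ↔  its first-'='-split has key "Name"
lemma pvStartswith_iff (l : String) :
    PySem.Str.startswith l "Name=" = true ↔
      ∃ b, pvPart l.toList = some ("Name".toList, b) := by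
  rw [PySem.Str.startswith]
  have hch : ("Name=" : String).toList = "Name".toList ++ '=' :: [] ++ [] := rfl
  rw [PySem.Chars.startswith_iff]
  constructor
  · rintro ⟨t, ht⟩
    refine ⟨t, ?_⟩
    have : l.toList = "Name".toList ++ '=' :: t := by
      rw [← ht]; rfl
    rw [this, pvPart_append _ _ (by decide)]
  · rintro ⟨b, hb⟩
    obtain ⟨hl, -⟩ := pvPart_some _ _ _ hb
    exact ⟨b, by rw [hl]; rfl⟩

-- B's step keeps an already-recorded "Name"
lemma pvBStep_keep (d : PySem.Dict String String) (line : String) (v : String)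
    (h : d.get? "Name" = some v) : (pvBStep d line).get? "Name" = some v := by
  simp only [pvBStep]
  by_cases hin : PySem.Str.isIn "=" (PySem.Str.strip line) = true
  · rw [if_pos hin]
    generalize ((PySem.Str.splitMax? (PySem.Str.strip line) "=" 1).getD []) = parts
    by_cases hk : parts.getD 0 "" = "Name"
    · rw [hk, if_pos (by rw [PySem.Dict.contains_eq_isSome_get?, h]; rfl)]
      exact h
    · by_cases hc : d.contains (parts.getD 0 "") = true
      · rw [if_pos hc]; exact h
      · rw [if_neg hc, PySem.Dict.get?_insert_of_ne _ _ (fun he => hk he.symm)]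
        exact h
  · rw [if_neg hin]; exact h

-- main invariant: the dict fold's "Name" answer is the recorded value, else A's scan of the rest
lemma pvMain : ∀ (lines : List String) (d : PySem.Dict String String),
    PySem.Dict.getD (lines.foldl pvBStep d) "Name" "N/A" =
      match d.get? "Name" with
      | some v => v
      | none => pvALoop lines := by
  intro lines
  induction lines with
  | nil =>
    intro d
    rw [PySem.Dict.getD]
    cases h : d.get? "Name" with
    | none => simp [List.foldl, h, pvALoop]
    | some v => simp [List.foldl, h]
  | cons line rest ih =>
    intro d
    rw [List.foldl_cons, ih]
    cases hd : d.get? "Name" with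
    | some v => rw [pvBStep_keep d line v hd]
    | none =>
      cases hpp : pvPart (PySem.Str.strip line).toList with
      | none =>
        -- no '=': B skips the line, A's startswith is false
        have hppc : pvPart (PySem.Chars.strip line.toList) = none :=
          PySem.Str.toList_strip (s := line) ▸ hpp
        have hin : PySem.Str.isIn "=" (PySem.Str.strip line) = false := by
          rw [← Bool.not_eq_true, pvIsIn_iff]; simp [hppc]
        have hsw : PySem.Str.startswith (PySem.Str.strip line) "Name=" = false := by
          rw [← Bool.not_eq_true, pvStartswith_iff]; simp [hppc]
        have hstep : pvBStep d line = d := by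
          simp only [pvBStep]; rw [if_neg (by rw [hin]; simp)]
        have hswc : PySem.Chars.startswith (PySem.Chars.strip line.toList) ['N', 'a', 'm', 'e', '='] = false := by
          rw [PySem.Str.startswith, PySem.Str.toList_strip] at hsw; exact hsw
        rw [hstep, hd]
        simp [pvALoop, hswc]
      | some p =>
        obtain ⟨a, b⟩ := p
        have hppc : pvPart (PySem.Chars.strip line.toList) = some (a, b) :=
          PySem.Str.toList_strip (s := line) ▸ hpp
        have hin : PySem.Str.isIn "=" (PySem.Str.strip line) = true := by
          rw [pvIsIn_iff]; simp [hppc]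
        have hparts : ((PySem.Str.splitMax? (PySem.Str.strip line) "=" 1).getD []) =
            [String.ofList a, String.ofList b] := by rw [pvSplitStr, hpp]
        by_cases ha : a = "Name".toList
        · -- the key is "Name": B records strip(b), A returns strip(b)
          subst ha
          have hsw : PySem.Str.startswith (PySem.Str.strip line) "Name=" = true := by
            rw [pvStartswith_iff]; exact ⟨b, hpp⟩
          have hstep : pvBStep d line =
              d.insert "Name" (PySem.Str.strip (String.ofList b)) := by
            simp only [pvBStep]
            rw [if_pos hin, hparts]
            have hkey : ([String.ofList "Name".toList, String.ofList b].getD 0 "") = "Name" := by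
              simp [List.getD]
            rw [hkey, if_neg (by rw [PySem.Dict.contains_eq_isSome_get?, hd]; simp)]
            simp [List.getD]
          have hswc : PySem.Chars.startswith (PySem.Chars.strip line.toList) ['N', 'a', 'm', 'e', '='] = true := by
            rw [PySem.Str.startswith, PySem.Str.toList_strip] at hsw; exact hsw
          rw [hstep, PySem.Dict.get?_insert_self, pvALoop]
          simp [hswc, hparts, PySem.List.pyGet?, PySem.List.pyIdx?]
        · -- another key: B records it (or not), A skips the line; "Name" stays absent
          have hsw : PySem.Str.startswith (PySem.Str.strip line) "Name=" = false := by
            rw [← Bool.not_eq_true, pvStartswith_iff]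
            rintro ⟨b', hb'⟩
            rw [hpp] at hb'
            exact ha (by injection hb' with h'; exact (Prod.mk.injEq .. ▸ h').1)
          have hne : String.ofList a ≠ "Name" := fun he => ha (by simpa using congrArg String.toList he)
          have hstep : (pvBStep d line).get? "Name" = d.get? "Name" := by
            simp only [pvBStep]
            rw [if_pos hin, hparts]
            have hkey : ([String.ofList a, String.ofList b].getD 0 "") = String.ofList a := by
              simp [List.getD]
            rw [hkey]
            split
            · rfl
            · exact PySem.Dict.get?_insert_of_ne _ _ (Ne.symm hne)
          have hswc : PySem.Chars.startswith (PySem.Chars.strip line.toList) ['N', 'a', 'm', 'e', '='] = false := by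
            rw [PySem.Str.startswith, PySem.Str.toList_strip] at hsw; exact hsw
          rw [hstep, hd, pvALoop]
          simp [hswc]

-- ===== VERDICT (by name: the statement is the Claim_ definition above) =====
theorem format_cpu_windows_py_spec : Claim_equal_format_cpu_windows_py := by
  intro raw _
  unfold Spec_format_cpu_windows_py format_cpu_windows_py format_cpu_windows_py_alt
  rw [pvMain (PySem.Str.splitlines raw) PySem.Dict.empty]
  rfl
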